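-- pv_equiv track=rewrite | github.com/ericcrn/ici | segundo-semestre/votos/main.py | contar_votos
-- ===== SOURCE A (Python) =====
-- def contar_votos(votos, elecciones):
--     votos = votos.split("$")
--     dict = elecciones
--
--     for voto in votos:
--         for coalicion in dict:
--             for partido in dict[coalicion]:
--                 if partido in voto:
--                     dict[coalicion][partido] += 1
--
--     return dict
-- ===== SOURCE B (Python) =====
-- def contar_votos(votos, elecciones):
--     # Text-driven multi-pattern matching: instead of running a substring search for
--     # every (vote, party) pair, enumerate each vote's candidate substrings (one per
--     # start position and distinct pattern length) and look them up in a hash set of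
--     # party names; per vote each matched party counts once, exactly like `p in voto`.
--     # (A mutates `elecciones` in place and returns it; B returns a fresh structure
--     # with the same value.)
--     patterns = {p for ps in elecciones.values() for p in ps}
--     lengths = sorted({len(p) for p in patterns})
--     hits = {p: 0 for p in patterns}
--     for v in votos.split("$"):
--         n = len(v)
--         found = {v[i:i + L] for i in range(n + 1) for L in lengths
--                  if i + L <= n and v[i:i + L] in patterns}
--         for p in found:
--             hits[p] += 1
--     return {c: {p: base + hits[p] for p, base in ps.items()} for c, ps in elecciones.items()}
-- ===== Notes on version B (the rewrite author's own statement) =====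
-- stated objective: faster
-- what changed: A is pattern-driven: for every vote it runs a substring search for every party name; B is text-driven: it enumerates each vote's candidate substrings (one per start position and distinct pattern length) once, looks them up in a hash set of all party names, dedupes matches per vote, and rebuilds the result from the per-party hit counts, so the per-vote cost no longer scales with the number of parties.
import Mathlib
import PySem

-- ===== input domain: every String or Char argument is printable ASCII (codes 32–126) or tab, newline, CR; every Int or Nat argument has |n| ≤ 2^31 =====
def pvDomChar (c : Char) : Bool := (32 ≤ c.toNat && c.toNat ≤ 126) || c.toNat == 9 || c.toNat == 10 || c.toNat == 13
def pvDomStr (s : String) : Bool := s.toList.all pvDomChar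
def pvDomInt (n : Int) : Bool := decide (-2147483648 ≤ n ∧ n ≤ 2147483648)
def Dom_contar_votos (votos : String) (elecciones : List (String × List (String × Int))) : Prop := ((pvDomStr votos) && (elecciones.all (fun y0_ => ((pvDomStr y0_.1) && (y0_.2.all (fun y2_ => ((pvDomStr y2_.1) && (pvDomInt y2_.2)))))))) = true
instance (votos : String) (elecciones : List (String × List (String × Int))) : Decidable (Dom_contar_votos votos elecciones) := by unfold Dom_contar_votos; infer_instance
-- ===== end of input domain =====

-- B replaces A's pattern-driven search (substring-test every party in every vote) by a
-- text-driven one: enumerate each vote's candidate substrings (start position × distinct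
-- pattern length), look them up in a set of party names, dedupe per vote, rebuild from the
-- hit counts; equivalence is about the RETURN value only (the Python A mutates and returns
-- `elecciones` itself, B returns a fresh structure of equal value).

-- ===== PORT A =====
-- one vote's pass of A's two inner loops: `for coalicion in dict: for partido in dict[coalicion]: …`
-- (dict[coalicion] is looked up with default empty; the key is always present, being drawn from d.keys)
def pvStepA (voto : String) (d : PySem.Dict String (PySem.Dict String Int)) :
    PySem.Dict String (PySem.Dict String Int) :=
  d.keys.foldl (fun d coalicion =>
    ((d.getD coalicion PySem.Dict.empty).keys).foldl (fun d partido =>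
      if PySem.Str.isIn partido voto then
        d.modify coalicion PySem.Dict.empty (fun inner => inner.modify partido 0 (· + 1))
      else d) d) d

def contar_votos (votos : String) (elecciones : List (String × List (String × Int))) :
    List (String × List (String × Int)) :=
  let vs := (PySem.Str.split? votos "$").getD []  -- sep is the literal "$" ≠ "", so split? is always some
  let d0 : PySem.Dict String (PySem.Dict String Int) :=
    PySem.Dict.mk (elecciones.map (fun ce => (ce.1, PySem.Dict.mk ce.2)))
  let d := vs.foldl (fun d voto => pvStepA voto d) d0
  d.items.map (fun ce => (ce.1, ce.2.items))

-- ===== PORT B =====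
-- Source B's per-vote set comprehension:
-- found = {v[i:i+L] for i in range(n+1) for L in lengths if i+L <= n and v[i:i+L] in patterns}
def pvFoundB (lengths : List Int) (patterns : PySem.Set String) (v : String) :
    PySem.Set String :=
  let n : Int := PySem.Str.len v
  (PySem.List.pyRange 0 (n + 1)).foldl (fun s i =>
    lengths.foldl (fun s L =>
      if decide (i + L ≤ n) && patterns.contains (PySem.Str.slice v (some i) (some (i + L))) then
        s.add (PySem.Str.slice v (some i) (some (i + L)))
      else s) s) PySem.Set.empty

def contar_votos_alt (votos : String) (elecciones : List (String × List (String × Int))) :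
    List (String × List (String × Int)) :=
  let vs := (PySem.Str.split? votos "$").getD []  -- sep is the literal "$" ≠ "", so split? is always some
  let patterns : PySem.Set String :=
    PySem.Set.ofList (elecciones.flatMap (fun ce => ce.2.map Prod.fst))
  let lengths : List Int :=
    PySem.List.sorted (PySem.Set.ofList (patterns.map PySem.Str.len)) (fun x => x) false
  let hits0 : PySem.Dict String Int := PySem.Dict.mk (patterns.map (fun p => (p, (0 : Int))))
  let hits := vs.foldl (fun h v =>
    (pvFoundB lengths patterns v).foldl (fun h p => h.modify p 0 (· + 1)) h) hits0
  elecciones.map (fun ce =>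
    (ce.1, ce.2.map (fun pn => (pn.1, pn.2 + hits.getD pn.1 0))))

-- ===== PRECONDITION & SPEC =====
-- Pre_ excludes association lists with duplicate keys at either level: those do not
-- represent any Python dict input (A's argument is a dict[str, dict[str, int]]).
def Pre_contar_votos (votos : String) (elecciones : List (String × List (String × Int))) : Prop :=
  (elecciones.map Prod.fst).Nodup ∧ ∀ ce ∈ elecciones, (ce.2.map Prod.fst).Nodup
instance (votos : String) (elecciones : List (String × List (String × Int))) : Decidable (Pre_contar_votos votos elecciones) := by unfold Pre_contar_votos; infer_instance

def pvWitness_contar_votos : String × (List (String × List (String × Int))) :=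
  ("pa$pb x$pa", [("c1", [("pa", 0), ("pb", 1)]), ("c2", [("x", 2)])])

def Spec_contar_votos (votos : String) (elecciones : List (String × List (String × Int))) (out : List (String × List (String × Int))) : Prop := out = contar_votos_alt votos elecciones
instance (votos : String) (elecciones : List (String × List (String × Int))) (out : List (String × List (String × Int))) : Decidable (Spec_contar_votos votos elecciones out) := by unfold Spec_contar_votos; infer_instance

-- ===== CLAIM (what is proved, stated in full; the proofs are below) =====
def Claim_equal_contar_votos : Prop := ∀ (votos : String) (elecciones : List (String × List (String × Int))), Dom_contar_votos votos elecciones → Pre_contar_votos votos elecciones → Spec_contar_votos votos elecciones (contar_votos votos elecciones)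

-- ===== LEMMAS AND PROOFS =====

-- the effect of one vote `v` on ONE inner dict, restricted to the key list `ps`
def pvBumpI (v : String) (ps : List String) (i : PySem.Dict String Int) : PySem.Dict String Int :=
  ps.foldl (fun i p => if PySem.Str.isIn p v then i.modify p 0 (· + 1) else i) i

theorem pvBumpI_cons_pos (v p : String) (ps : List String) (i : PySem.Dict String Int)
    (hin : PySem.Str.isIn p v = true) :
    pvBumpI v (p :: ps) i = pvBumpI v ps (i.modify p 0 (· + 1)) := by
  unfold pvBumpI
  simp only [List.foldl_cons]
  rw [if_pos hin]

theorem pvBumpI_cons_neg (v p : String) (ps : List String) (i : PySem.Dict String Int)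
    (hin : ¬ PySem.Str.isIn p v = true) :
    pvBumpI v (p :: ps) i = pvBumpI v ps i := by
  unfold pvBumpI
  simp only [List.foldl_cons]
  rw [if_neg hin]

theorem pvBumpI_keys (v : String) : ∀ (ps : List String) (i : PySem.Dict String Int),
    (∀ p ∈ ps, p ∈ i.keys) → (pvBumpI v ps i).keys = i.keys := by
  intro ps
  induction ps with
  | nil => intro i _; rfl
  | cons p ps ih =>
    intro i hps
    have hmem : p ∈ i.keys := hps p (List.mem_cons_self ..)
    have hcont : i.contains p = true := (PySem.Dict.contains_iff_mem_keys _ _).mpr hmem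
    by_cases hin : PySem.Str.isIn p v = true
    · have hk : (i.modify p 0 (· + 1)).keys = i.keys := by
        rw [PySem.Dict.keys_modify, PySem.Dict.keys_insert_of_contains _ _ hcont]
      rw [pvBumpI_cons_pos v p ps i hin,
        ih _ (by intro q hq; rw [hk]; exact hps q (List.mem_cons_of_mem _ hq)), hk]
    · rw [pvBumpI_cons_neg v p ps i hin,
        ih _ (fun q hq => hps q (List.mem_cons_of_mem _ hq))]

theorem pvBumpI_getD (v : String) : ∀ (ps : List String), ps.Nodup →
    ∀ (i : PySem.Dict String Int) (q : String),
    (pvBumpI v ps i).getD q 0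
      = i.getD q 0 + (if q ∈ ps ∧ PySem.Str.isIn q v = true then 1 else 0) := by
  intro ps
  induction ps with
  | nil => intro _ i q; simp [pvBumpI]
  | cons p ps ih =>
    intro hnd i q
    have hnd' : ps.Nodup := hnd.of_cons
    have hpnot : p ∉ ps := by simp_all [List.nodup_cons]
    by_cases hin : PySem.Str.isIn p v = true
    · rw [pvBumpI_cons_pos v p ps i hin, ih hnd', PySem.Dict.getD_modify]
      by_cases hqp : q = p
      · subst hqp
        rw [if_pos rfl, if_neg (fun h => hpnot h.1),
          if_pos ⟨List.mem_cons_self .., hin⟩]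
        ring
      · rw [if_neg hqp]
        exact congrArg (fun z => i.getD q 0 + z)
          (if_congr (and_congr_left' (by simp [List.mem_cons, hqp])) rfl rfl)
    · rw [pvBumpI_cons_neg v p ps i hin, ih hnd']
      by_cases hqp : q = p
      · subst hqp
        rw [if_neg (fun h => hin h.2), if_neg (fun h => hin h.2)]
      · exact congrArg (fun z => i.getD q 0 + z)
          (if_congr (and_congr_left' (by simp [List.mem_cons, hqp])) rfl rfl)

theorem pvInnerFold_spec (v : String) : ∀ (ps : List String)
    (d : PySem.Dict String (PySem.Dict String Int)) (c : String), c ∈ d.keys →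
    ((ps.foldl (fun d partido =>
        if PySem.Str.isIn partido v then
          d.modify c PySem.Dict.empty (fun inner => inner.modify partido 0 (· + 1))
        else d) d).keys = d.keys ∧
     ∀ c', (ps.foldl (fun d partido =>
        if PySem.Str.isIn partido v then
          d.modify c PySem.Dict.empty (fun inner => inner.modify partido 0 (· + 1))
        else d) d).getD c' PySem.Dict.empty
        = if c' = c then pvBumpI v ps (d.getD c PySem.Dict.empty)
          else d.getD c' PySem.Dict.empty) := by
  intro ps
  induction ps with
  | nil =>
    intro d c _
    refine ⟨rfl, fun c' => ?_⟩
    show d.getD c' PySem.Dict.empty = _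
    by_cases h : c' = c
    · subst h; rw [if_pos rfl]; rfl
    · rw [if_neg h]
  | cons p ps ih =>
    intro d c hc
    have hcont : d.contains c = true := (PySem.Dict.contains_iff_mem_keys _ _).mpr hc
    by_cases hin : PySem.Str.isIn p v = true
    · have hk : (d.modify c PySem.Dict.empty
          (fun inner => inner.modify p 0 (· + 1))).keys = d.keys := by
        rw [PySem.Dict.keys_modify, PySem.Dict.keys_insert_of_contains _ _ hcont]
      obtain ⟨ka, kb⟩ := ih (d.modify c PySem.Dict.empty
          (fun inner => inner.modify p 0 (· + 1))) c (by rw [hk]; exact hc)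
      constructor
      · simp only [List.foldl_cons]
        rw [if_pos hin, ka, hk]
      · intro c'
        simp only [List.foldl_cons]
        rw [if_pos hin, kb c']
        by_cases hq : c' = c
        · subst hq
          rw [if_pos rfl, if_pos rfl, PySem.Dict.getD_modify, if_pos rfl,
            pvBumpI_cons_pos v p ps _ hin]
        · rw [if_neg hq, if_neg hq, PySem.Dict.getD_modify, if_neg hq]
    · obtain ⟨ka, kb⟩ := ih d c hc
      constructor
      · simp only [List.foldl_cons]
        rw [if_neg hin, ka]
      · intro c'
        simp only [List.foldl_cons]
        rw [if_neg hin, kb c']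
        by_cases hq : c' = c
        · subst hq
          rw [if_pos rfl, if_pos rfl, pvBumpI_cons_neg v p ps _ hin]
        · rw [if_neg hq, if_neg hq]

theorem pvOuterFold_spec (v : String) : ∀ (ks : List String)
    (d : PySem.Dict String (PySem.Dict String Int)), ks.Nodup → (∀ c ∈ ks, c ∈ d.keys) →
    ((ks.foldl (fun d coalicion =>
        ((d.getD coalicion PySem.Dict.empty).keys).foldl (fun d partido =>
          if PySem.Str.isIn partido v then
            d.modify coalicion PySem.Dict.empty (fun inner => inner.modify partido 0 (· + 1))
          else d) d) d).keys = d.keys ∧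
     ∀ c, (ks.foldl (fun d coalicion =>
        ((d.getD coalicion PySem.Dict.empty).keys).foldl (fun d partido =>
          if PySem.Str.isIn partido v then
            d.modify coalicion PySem.Dict.empty (fun inner => inner.modify partido 0 (· + 1))
          else d) d) d).getD c PySem.Dict.empty
        = if c ∈ ks then
            pvBumpI v (d.getD c PySem.Dict.empty).keys (d.getD c PySem.Dict.empty)
          else d.getD c PySem.Dict.empty) := by
  intro ks
  induction ks with
  | nil => intro d _ _; exact ⟨rfl, fun c => by simp⟩
  | cons c0 ks ih =>
    intro d hnd hsub
    have hc0 : c0 ∈ d.keys := hsub c0 (List.mem_cons_self ..)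
    obtain ⟨ia, ib⟩ := pvInnerFold_spec v ((d.getD c0 PySem.Dict.empty).keys) d c0 hc0
    set d' := ((d.getD c0 PySem.Dict.empty).keys).foldl (fun d partido =>
          if PySem.Str.isIn partido v then
            d.modify c0 PySem.Dict.empty (fun inner => inner.modify partido 0 (· + 1))
          else d) d with hd'
    have hc0not : c0 ∉ ks := by simp_all [List.nodup_cons]
    obtain ⟨ka, kb⟩ := ih d' hnd.of_cons
      (by intro c hc; rw [ia]; exact hsub c (List.mem_cons_of_mem _ hc))
    constructor
    · simp only [List.foldl_cons]
      rw [← hd', ka, ia]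
    · intro c
      simp only [List.foldl_cons]
      rw [← hd', kb c]
      by_cases hmem : c ∈ ks
      · have hne : c ≠ c0 := fun h => hc0not (h ▸ hmem)
        rw [if_pos hmem, ib c, if_neg hne, if_pos (List.mem_cons_of_mem _ hmem)]
      · rw [if_neg hmem, ib c]
        by_cases hq : c = c0
        · subst hq
          rw [if_pos rfl, if_pos (List.mem_cons_self ..)]
        · rw [if_neg hq, if_neg (by simp [List.mem_cons, hq, hmem])]

theorem pvMain_spec : ∀ (vs : List String) (d : PySem.Dict String (PySem.Dict String Int)),
    d.keys.Nodup → (∀ c, (d.getD c PySem.Dict.empty).keys.Nodup) →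
    ((vs.foldl (fun d voto => pvStepA voto d) d).keys = d.keys ∧
     (∀ c, ((vs.foldl (fun d voto => pvStepA voto d) d).getD c PySem.Dict.empty).keys
        = (d.getD c PySem.Dict.empty).keys) ∧
     ∀ c p, ((vs.foldl (fun d voto => pvStepA voto d) d).getD c PySem.Dict.empty).getD p 0
        = (d.getD c PySem.Dict.empty).getD p 0 +
          (if c ∈ d.keys ∧ p ∈ (d.getD c PySem.Dict.empty).keys then
            (vs.map (fun v => if PySem.Str.isIn p v then (1 : Int) else 0)).sum
           else 0)) := by
  intro vs
  induction vs with
  | nil => intro d _ _; exact ⟨rfl, fun c => rfl, fun c p => by simp⟩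
  | cons v vs ih =>
    intro d hnd hinner
    obtain ⟨sa, sb⟩ := pvOuterFold_spec v d.keys d hnd (fun c hc => hc)
    have hstepk : (pvStepA v d).keys = d.keys := sa
    have hstepg : ∀ c, (pvStepA v d).getD c PySem.Dict.empty
        = if c ∈ d.keys then
            pvBumpI v (d.getD c PySem.Dict.empty).keys (d.getD c PySem.Dict.empty)
          else d.getD c PySem.Dict.empty := sb
    have hinnerk : ∀ c, ((pvStepA v d).getD c PySem.Dict.empty).keys
        = (d.getD c PySem.Dict.empty).keys := by
      intro c
      rw [hstepg c]
      by_cases hc : c ∈ d.keys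
      · rw [if_pos hc, pvBumpI_keys v _ _ (fun p hp => hp)]
      · rw [if_neg hc]
    obtain ⟨ma, mb, mc⟩ := ih (pvStepA v d)
      (by rw [hstepk]; exact hnd)
      (by intro c; rw [hinnerk c]; exact hinner c)
    simp only [List.foldl_cons]
    refine ⟨by rw [ma, hstepk], fun c => by rw [mb c, hinnerk c], fun c p => ?_⟩
    rw [mc c p, hstepk, hinnerk c, hstepg c]
    by_cases hc : c ∈ d.keys
    · rw [if_pos hc, pvBumpI_getD v _ (hinner c)]
      by_cases hp : p ∈ (d.getD c PySem.Dict.empty).keys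
      · by_cases hin : PySem.Str.isIn p v = true
        · rw [if_pos ⟨hp, hin⟩, if_pos ⟨hc, hp⟩, if_pos ⟨hc, hp⟩,
            List.map_cons, List.sum_cons, if_pos hin]
          ring
        · rw [if_neg (fun h => hin h.2), if_pos ⟨hc, hp⟩, if_pos ⟨hc, hp⟩,
            List.map_cons, List.sum_cons, if_neg hin]
          ring
      · rw [if_neg (fun h => hp h.1), if_neg (fun h => hp h.2), if_neg (fun h => hp h.2)]
        ring
    · rw [if_neg hc, if_neg (fun h => hc h.1), if_neg (fun h => hc h.1)]

-- value of d0 := mk (elecciones.map …) at a key of one of its entries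
theorem pvD0_getD (elecciones : List (String × List (String × Int)))
    (hnd : (elecciones.map Prod.fst).Nodup) (ce : String × List (String × Int))
    (hce : ce ∈ elecciones) :
    (PySem.Dict.mk (elecciones.map (fun ce => (ce.1, PySem.Dict.mk ce.2)))).getD ce.1
      PySem.Dict.empty = PySem.Dict.mk ce.2 := by
  apply PySem.Dict.getD_of_mem_items
  · exact List.mem_map.mpr ⟨ce, hce, rfl⟩
  · show ((elecciones.map (fun ce => (ce.1, PySem.Dict.mk ce.2))).map Prod.fst).Nodup
    simpa [List.map_map, Function.comp] using hnd

theorem pvD0_keys (elecciones : List (String × List (String × Int))) :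
    (PySem.Dict.mk (elecciones.map (fun ce => (ce.1, PySem.Dict.mk ce.2)))).keys
      = elecciones.map Prod.fst := by
  show (elecciones.map (fun ce => (ce.1, PySem.Dict.mk ce.2))).map Prod.fst
      = elecciones.map Prod.fst
  simp [List.map_map, Function.comp]

-- A equals the canonical per-party counting form
theorem pvA_eq_canon (votos : String) (elecciones : List (String × List (String × Int)))
    (hnd : (elecciones.map Prod.fst).Nodup)
    (hinner : ∀ ce ∈ elecciones, (ce.2.map Prod.fst).Nodup) :
    contar_votos votos elecciones
      = elecciones.map (fun ce => (ce.1, ce.2.map (fun pn =>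
          (pn.1, pn.2 + (((PySem.Str.split? votos "$").getD []).map
            (fun v => if PySem.Str.isIn pn.1 v then (1 : Int) else 0)).sum)))) := by
  have hA : contar_votos votos elecciones
      = (List.foldl (fun d voto => pvStepA voto d)
          (PySem.Dict.mk (elecciones.map (fun ce => (ce.1, PySem.Dict.mk ce.2))))
          ((PySem.Str.split? votos "$").getD [])).items.map (fun ce => (ce.1, ce.2.items)) := rfl
  rw [hA]
  set vs := (PySem.Str.split? votos "$").getD [] with hvs
  set d0 := PySem.Dict.mk (elecciones.map (fun ce => (ce.1, PySem.Dict.mk ce.2))) with hd0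
  have hk0 : d0.keys = elecciones.map Prod.fst := pvD0_keys elecciones
  have hnd0 : d0.keys.Nodup := by rw [hk0]; exact hnd
  have hinner0 : ∀ c, (d0.getD c PySem.Dict.empty).keys.Nodup := by
    intro c
    by_cases hc : c ∈ d0.keys
    · rw [hk0] at hc
      obtain ⟨ce, hce, rfl⟩ := List.mem_map.mp hc
      rw [pvD0_getD elecciones hnd ce hce]
      show (ce.2.map Prod.fst).Nodup
      exact hinner ce hce
    · have hcont : d0.contains c = false := by
        cases h : d0.contains c
        · rfl
        · exact absurd ((PySem.Dict.contains_iff_mem_keys _ _).mp h) hc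
      rw [PySem.Dict.getD_of_not_contains _ _ hcont]
      exact List.nodup_nil
  obtain ⟨ma, mb, mc⟩ := pvMain_spec vs d0 hnd0 hinner0
  set F := List.foldl (fun d voto => pvStepA voto d) d0 vs with hF
  have hFnd : F.keys.Nodup := by rw [ma]; exact hnd0
  rw [PySem.Dict.items_eq_map_keys F hFnd PySem.Dict.empty, ma, hk0,
    List.map_map, List.map_map]
  apply List.map_congr_left
  intro ce hce
  simp only [Function.comp]
  have hd0ce : d0.getD ce.1 PySem.Dict.empty = PySem.Dict.mk ce.2 :=
    pvD0_getD elecciones hnd ce hce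
  have hFik : (F.getD ce.1 PySem.Dict.empty).keys = ce.2.map Prod.fst := by
    rw [mb ce.1, hd0ce]; rfl
  have hFind : (F.getD ce.1 PySem.Dict.empty).keys.Nodup := by
    rw [hFik]; exact hinner ce hce
  refine congrArg (fun x => (ce.1, x)) ?_
  rw [PySem.Dict.items_eq_map_keys _ hFind 0, hFik, List.map_map]
  apply List.map_congr_left
  intro pn hpn
  simp only [Function.comp]
  have hc : ce.1 ∈ d0.keys := by rw [hk0]; exact List.mem_map.mpr ⟨ce, hce, rfl⟩
  have hp : pn.1 ∈ (d0.getD ce.1 PySem.Dict.empty).keys := by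
    rw [hd0ce]
    show pn.1 ∈ ce.2.map Prod.fst
    exact List.mem_map.mpr ⟨pn, hpn, rfl⟩
  refine congrArg (fun x => (pn.1, x)) ?_
  rw [mc ce.1 pn.1, if_pos ⟨hc, hp⟩, hd0ce,
    PySem.Dict.getD_of_mem_items (PySem.Dict.mk ce.2) hpn (hinner ce hce) 0]

-- ----- B-side lemmas -----

-- generic membership through a conditional-add fold
theorem pvFoldMem {α : Type} (q : String) (Q : α → Prop)
    (g : PySem.Set String → α → PySem.Set String)
    (hg : ∀ s x, q ∈ g s x ↔ q ∈ s ∨ Q x) :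
    ∀ (xs : List α) (s : PySem.Set String),
      q ∈ xs.foldl g s ↔ q ∈ s ∨ ∃ x ∈ xs, Q x := by
  intro xs
  induction xs with
  | nil => intro s; simp
  | cons x xs ih =>
    intro s
    rw [List.foldl_cons, ih, hg]
    constructor
    · rintro (⟨h | h⟩ | ⟨y, hy, hQ⟩)
      · exact Or.inl h
      · exact Or.inr ⟨x, List.mem_cons_self .., h⟩
      · exact Or.inr ⟨y, List.mem_cons_of_mem _ hy, hQ⟩
    · rintro (h | ⟨y, hy, hQ⟩)
      · exact Or.inl (Or.inl h)
      · rcases List.mem_cons.mp hy with rfl | hy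
        · exact Or.inl (Or.inr hQ)
        · exact Or.inr ⟨y, hy, hQ⟩

theorem pvFoldNodup {α : Type} (g : PySem.Set String → α → PySem.Set String)
    (hg : ∀ s x, s.Nodup → (g s x).Nodup) :
    ∀ (xs : List α) (s : PySem.Set String), s.Nodup → (xs.foldl g s).Nodup := by
  intro xs
  induction xs with
  | nil => intro s h; exact h
  | cons x xs ih => intro s h; exact ih _ (hg s x h)

theorem pvFoundB_nodup (lengths : List Int) (patterns : PySem.Set String) (v : String) :
    (pvFoundB lengths patterns v).Nodup := by
  unfold pvFoundB
  apply pvFoldNodup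
  · intro s i hs
    apply pvFoldNodup
    · intro s L hs
      split_ifs
      · exact PySem.Set.nodup_add _ _ hs
      · exact hs
    · exact hs
  · exact List.nodup_nil

theorem pvFoundB_mem (lengths : List Int) (patterns : PySem.Set String) (v : String)
    (q : String) :
    q ∈ pvFoundB lengths patterns v
      ↔ ∃ i ∈ PySem.List.pyRange 0 (PySem.Str.len v + 1), ∃ L ∈ lengths,
          i + L ≤ PySem.Str.len v ∧
          PySem.Str.slice v (some i) (some (i + L)) ∈ patterns ∧
          q = PySem.Str.slice v (some i) (some (i + L)) := by
  unfold pvFoundB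
  rw [pvFoldMem q (fun i => ∃ L ∈ lengths,
      i + L ≤ PySem.Str.len v ∧
      PySem.Str.slice v (some i) (some (i + L)) ∈ patterns ∧
      q = PySem.Str.slice v (some i) (some (i + L)))]
  · simp [PySem.Set.empty]
  · intro s i
    rw [pvFoldMem q (fun L =>
        i + L ≤ PySem.Str.len v ∧
        PySem.Str.slice v (some i) (some (i + L)) ∈ patterns ∧
        q = PySem.Str.slice v (some i) (some (i + L)))]
    intro s' L
    by_cases h1 : i + L ≤ PySem.Str.len v
    · by_cases h2 : PySem.Set.contains patterns (PySem.Str.slice v (some i) (some (i + L))) = true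
      · rw [if_pos (by simp only [Bool.and_eq_true, decide_eq_true_eq]; exact ⟨h1, h2⟩), PySem.Set.mem_add]
        have h2' := (PySem.Set.contains_iff _ _).mp h2
        constructor
        · rintro (h | rfl)
          · exact Or.inl h
          · exact Or.inr ⟨h1, h2', rfl⟩
        · rintro (h | ⟨-, -, rfl⟩)
          · exact Or.inl h
          · exact Or.inr rfl
      · rw [if_neg (by simp only [Bool.and_eq_true, decide_eq_true_eq, not_and]; exact fun _ => h2)]
        constructor
        · exact fun h => Or.inl h
        · rintro (h | ⟨-, hc, -⟩)
          · exact h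
          · exact absurd ((PySem.Set.contains_iff _ _).mpr hc) h2
    · rw [if_neg (by simp only [Bool.and_eq_true, decide_eq_true_eq, not_and]; exact fun h => absurd h h1)]
      constructor
      · exact fun h => Or.inl h
      · rintro (h | ⟨hc, -⟩)
        · exact h
        · exact absurd hc h1

-- found(v) contains p iff p is a substring of v  (for p ∈ patterns with len p ∈ lengths)
theorem pvFoundB_char (lengths : List Int) (patterns : PySem.Set String) (v p : String)
    (hp : p ∈ patterns) (hlen : PySem.Str.len p ∈ lengths)
    (hpos : ∀ L ∈ lengths, ∃ r : String, L = PySem.Str.len r) :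
    (p ∈ pvFoundB lengths patterns v) ↔ PySem.Str.isIn p v = true := by
  rw [pvFoundB_mem]
  constructor
  · rintro ⟨i, hi, L, hL, hle, -, rfl⟩
    obtain ⟨hi0, -⟩ := PySem.List.mem_pyRange_one.mp hi
    obtain ⟨r, rfl⟩ := hpos L hL
    rw [PySem.Str.isIn_eq, PySem.Str.toList_slice, PySem.Chars.slice_eq_listSlice]
    have hi' : i = ((i.toNat : Nat) : Int) := by omega
    rw [hi', PySem.Str.len_eq, PySem.List.slice_natCast_add]
    apply (PySem.Chars.exists_prefix_drop_iff_isIn _ _).mp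
    exact ⟨i.toNat, List.take_prefix _ _⟩
  · intro hin
    rw [PySem.Str.isIn_eq] at hin
    obtain ⟨j, hpre⟩ := (PySem.Chars.exists_prefix_drop_iff_isIn p.toList v.toList).mpr hin
    set j' := min j v.toList.length with hj'
    have hpre' : p.toList <+: v.toList.drop j' := by
      by_cases hje : j ≤ v.toList.length
      · rwa [hj', min_eq_left hje]
      · have hnil : v.toList.drop j = [] := List.drop_eq_nil_of_le (by omega)
        rw [hnil] at hpre
        have hpnil : p.toList = [] := List.prefix_nil.mp hpre
        rw [hpnil]
        exact List.nil_prefix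
    have hjle : j' ≤ v.toList.length := min_le_right _ _
    have hlenle : p.toList.length ≤ v.toList.length - j' := by
      have := hpre'.length_le
      rw [List.length_drop] at this
      omega
    refine ⟨(j' : Int), ?_, PySem.Str.len p, hlen, ?_, ?_, ?_⟩
    · rw [PySem.List.mem_pyRange_one, PySem.Str.len_eq]
      omega
    · rw [PySem.Str.len_eq, PySem.Str.len_eq]
      omega
    · have : PySem.Str.slice v (some (j' : Int))
          (some ((j' : Int) + PySem.Str.len p)) = p := by
        apply String.toList_inj.mp
        rw [PySem.Str.toList_slice, PySem.Chars.slice_eq_listSlice, PySem.Str.len_eq,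
          PySem.List.slice_natCast_add]
        exact (List.prefix_iff_eq_take.mp hpre').symm
      rw [this]; exact hp
    · apply String.toList_inj.mp
      rw [PySem.Str.toList_slice, PySem.Chars.slice_eq_listSlice, PySem.Str.len_eq,
        PySem.List.slice_natCast_add]
      exact List.prefix_iff_eq_take.mp hpre'

-- one vote's increments: each found party once
theorem pvHitsStep : ∀ (ms : List String), ms.Nodup →
    ∀ (h : PySem.Dict String Int) (q : String),
    (ms.foldl (fun h p => h.modify p 0 (· + 1)) h).getD q 0
      = h.getD q 0 + (if q ∈ ms then 1 else 0) := by
  intro ms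
  induction ms with
  | nil => intro _ h q; simp
  | cons m ms ih =>
    intro hnd h q
    have hmnot : m ∉ ms := by simp_all [List.nodup_cons]
    rw [List.foldl_cons, ih hnd.of_cons, PySem.Dict.getD_modify]
    by_cases hq : q = m
    · subst hq
      rw [if_pos rfl, if_neg hmnot, if_pos (List.mem_cons_self ..)]
      ring
    · rw [if_neg hq]
      exact congrArg (fun z => h.getD q 0 + z)
        (if_congr (by simp [List.mem_cons, hq]) rfl rfl)

theorem pvHitsMain (lengths : List Int) (patterns : PySem.Set String) :
    ∀ (vs : List String) (h : PySem.Dict String Int) (q : String),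
    (vs.foldl (fun h v =>
        (pvFoundB lengths patterns v).foldl (fun h p => h.modify p 0 (· + 1)) h) h).getD q 0
      = h.getD q 0 + (vs.map (fun v =>
          if q ∈ pvFoundB lengths patterns v then (1 : Int) else 0)).sum := by
  intro vs
  induction vs with
  | nil => intro h q; simp
  | cons v vs ih =>
    intro h q
    rw [List.foldl_cons, ih, pvHitsStep _ (pvFoundB_nodup lengths patterns v),
      List.map_cons, List.sum_cons]
    ring

theorem pvHits0_getD : ∀ (l : List String) (q : String),
    (PySem.Dict.mk (l.map (fun p => (p, (0 : Int))))).getD q 0 = 0 := by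
  intro l
  induction l with
  | nil => intro q; rfl
  | cons p l ih =>
    intro q
    show ((PySem.Dict.mk ((p, (0:Int)) :: l.map (fun p => (p, (0 : Int))))).get? q).getD 0 = 0
    rw [PySem.Dict.get?_mk_cons]
    by_cases hq : (p == q) = true
    · rw [if_pos hq]; rfl
    · rw [if_neg hq]; exact ih q

-- B equals the canonical per-party counting form
theorem pvB_eq_canon (votos : String) (elecciones : List (String × List (String × Int))) :
    contar_votos_alt votos elecciones
      = elecciones.map (fun ce => (ce.1, ce.2.map (fun pn =>
          (pn.1, pn.2 + (((PySem.Str.split? votos "$").getD []).map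
            (fun v => if PySem.Str.isIn pn.1 v then (1 : Int) else 0)).sum)))) := by
  unfold contar_votos_alt
  set vs := (PySem.Str.split? votos "$").getD [] with hvs
  set patterns := PySem.Set.ofList (elecciones.flatMap (fun ce => ce.2.map Prod.fst))
    with hpatterns
  set lengths := PySem.List.sorted (PySem.Set.ofList (patterns.map PySem.Str.len))
    (fun x => x) false with hlengths
  have hpos : ∀ L ∈ lengths, ∃ r : String, L = PySem.Str.len r := by
    intro L hL
    rw [hlengths, PySem.List.mem_sorted, PySem.Set.mem_ofList] at hL
    obtain ⟨r, -, rfl⟩ := List.mem_map.mp hL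
    exact ⟨r, rfl⟩
  apply List.map_congr_left
  intro ce hce
  refine congrArg (fun x => (ce.1, x)) ?_
  apply List.map_congr_left
  intro pn hpn
  refine congrArg (fun x => (pn.1, pn.2 + x)) ?_
  have hp : pn.1 ∈ patterns := by
    rw [hpatterns, PySem.Set.mem_ofList]
    exact List.mem_flatMap.mpr ⟨ce, hce, List.mem_map.mpr ⟨pn, hpn, rfl⟩⟩
  have hlen : PySem.Str.len pn.1 ∈ lengths := by
    rw [hlengths, PySem.List.mem_sorted, PySem.Set.mem_ofList]
    exact List.mem_map.mpr ⟨pn.1, hp, rfl⟩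
  rw [pvHitsMain, pvHits0_getD, zero_add]
  apply congrArg List.sum
  apply List.map_congr_left
  intro v _
  by_cases hin : PySem.Str.isIn pn.1 v = true
  · rw [if_pos hin, if_pos ((pvFoundB_char lengths patterns v pn.1 hp hlen hpos).mpr hin)]
  · rw [if_neg hin,
      if_neg (fun h => hin ((pvFoundB_char lengths patterns v pn.1 hp hlen hpos).mp h))]

-- ===== VERDICT (by name: the statement is the Claim_ definition above) =====
theorem contar_votos_spec : Claim_equal_contar_votos := by
  intro votos elecciones _ hpre
  obtain ⟨hnd, hinner⟩ := hpre
  unfold Spec_contar_votos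
  rw [pvA_eq_canon votos elecciones hnd hinner, pvB_eq_canon votos elecciones]
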